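-- pv_equiv track=rewrite | github.com/LauriTuomisto/sunset | main.py | months_to_days
-- ===== SOURCE A (Python) =====
-- def months_to_days(month, leap=False):
--     """Function used to calculate how many days a month corresponds to."""
--     day_count = 0
--     i = 1
--     while i < month:
--         if i in [1, 3, 5, 7, 8, 10, 12]:
--             day_count += 31
--         elif i in [4, 6, 9, 11]:
--             day_count += 30
--         elif leap:
--             day_count += 29
--         else:
--             day_count += 28
--
--         i += 1
--     return day_count
-- ===== SOURCE B (Python) =====
-- def months_to_days(month, leap=False):
--     """Cumulative-day table: cum[m] = number of days in the first m months."""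
--     total = 0
--     cum = []
--     for d in [0, 31, 29 if leap else 28, 31, 30, 31, 30, 31, 31, 30, 31, 30, 31]:
--         total += d
--         cum.append(total)
--     return cum[max(month - 1, 0)]
-- ===== Notes on version B (the rewrite author's own statement) =====
-- stated objective: simpler
-- what changed: Replaces the month-by-month while loop and branch cascade with a cumulative-days table indexed directly by the month; Pre_ excludes month >= 14, where A's loop keeps adding February-length days for nonexistent months while B's table lookup raises IndexError.
-- outside the precondition, e.g. on months_to_days(14, False): A returns 393, B raises IndexError; on months_to_days(20, True): A returns 569, B raises IndexError
import Mathlib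
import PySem

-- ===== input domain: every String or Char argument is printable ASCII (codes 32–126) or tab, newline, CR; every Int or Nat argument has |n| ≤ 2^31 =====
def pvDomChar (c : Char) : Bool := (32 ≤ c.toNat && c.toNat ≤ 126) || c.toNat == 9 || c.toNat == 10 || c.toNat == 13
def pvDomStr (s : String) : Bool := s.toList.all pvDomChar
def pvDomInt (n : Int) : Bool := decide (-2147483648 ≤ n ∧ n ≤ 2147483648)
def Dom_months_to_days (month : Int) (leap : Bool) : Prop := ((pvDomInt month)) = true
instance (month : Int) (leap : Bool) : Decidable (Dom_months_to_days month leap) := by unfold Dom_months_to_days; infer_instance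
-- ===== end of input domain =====

-- B replaces A's month-by-month while loop and branch cascade with a cumulative-days table lookup (objective: simpler).

-- ===== PORT A =====
-- A's while loop, transliterated with fuel (month.toNat bounds the iteration count; the i < month guard does the real work)
def monthsLoopA (leap : Bool) (month : Int) : Nat → Int → Int → Int
  | 0, _, dc => dc
  | Nat.succ f, i, dc =>
    if i < month then
      monthsLoopA leap month f (i + 1)
        (if i = 1 ∨ i = 3 ∨ i = 5 ∨ i = 7 ∨ i = 8 ∨ i = 10 ∨ i = 12 then dc + 31
         else if i = 4 ∨ i = 6 ∨ i = 9 ∨ i = 11 then dc + 30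
         else if leap then dc + 29
         else dc + 28)
    else dc

def months_to_days (month : Int) (leap : Bool) : Int :=
  monthsLoopA leap month month.toNat 1 0

-- ===== PORT B =====
-- cum[month-1] raises IndexError in Python for month ≥ 14; the port returns (… ).getD 0 there, outside Pre_.
def months_to_days_alt (month : Int) (leap : Bool) : Int :=
  let st := (([0, 31, if leap then 29 else 28, 31, 30, 31, 30, 31, 31, 30, 31, 30, 31] : List Int).foldl
      (fun (st : Int × List Int) d => (st.1 + d, st.2 ++ [st.1 + d])) (0, []))
  (PySem.List.pyGet? st.2 (max (month - 1) 0)).getD 0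

-- ===== PRECONDITION & SPEC =====
-- Pre_ excludes month ≥ 14, where A's while loop keeps adding February-length days for nonexistent
-- months while B's table lookup raises IndexError (B returns no value there).
def Pre_months_to_days (month : Int) (leap : Bool) : Prop := month ≤ 13
instance (month : Int) (leap : Bool) : Decidable (Pre_months_to_days month leap) := by unfold Pre_months_to_days; infer_instance

def pvWitness_months_to_days : Int × Bool := (7, false)

def Spec_months_to_days (month : Int) (leap : Bool) (out : Int) : Prop := out = months_to_days_alt month leap
instance (month : Int) (leap : Bool) (out : Int) : Decidable (Spec_months_to_days month leap out) := by unfold Spec_months_to_days; infer_instance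

-- ===== CLAIM (what is proved, stated in full; the proofs are below) =====
def Claim_equal_months_to_days : Prop := ∀ (month : Int) (leap : Bool), Dom_months_to_days month leap → Pre_months_to_days month leap → Spec_months_to_days month leap (months_to_days month leap)

-- ===== LEMMAS AND PROOFS =====

-- ===== VERDICT (by name: the statement is the Claim_ definition above) =====
theorem months_to_days_spec : Claim_equal_months_to_days := by
  intro month leap hdom hpre
  unfold Spec_months_to_days
  have hdom' : -2147483648 ≤ month ∧ month ≤ 2147483648 := by
    simpa [Dom_months_to_days, pvDomInt] using hdom
  by_cases hsmall : month ≤ 1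
  · have hz : month.toNat = 0 ∨ month.toNat = 1 := by omega
    have hmax : max (month - 1) 0 = 0 := by omega
    unfold months_to_days months_to_days_alt
    rcases hz with h | h <;> rw [h] <;>
      simp [monthsLoopA, show ¬((1:Int) < month) from by omega, hmax, List.foldl,
        PySem.List.pyGet?, PySem.List.pyIdx?]
  · have h2 : 2 ≤ month := by omega
    have h13 : month ≤ 13 := hpre
    interval_cases month <;> cases leap <;> decide
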